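-- pv_equiv track=rewrite | github.com/Reemostat/Rl_Multi_Agent_Code_Optimizer | experiments/dataset/sample_208.py | analyze_data_2
-- ===== SOURCE A (Python) =====
-- def analyze_data_2(data):
--     max_val = data[0]
--     for item in data:
--         if item > max_val:
--             max_val = item
--
--     min_val = data[0]
--     for item in data:
--         if item < min_val:
--             min_val = item
--
--     return max_val - min_val
-- ===== SOURCE B (Python) =====
-- def analyze_data_2(data):
--     s = sorted(data)
--     return s[-1] - s[0]
-- ===== Notes on version B (the rewrite author's own statement) =====
-- stated objective: simpler
-- what changed: Replaces A's two explicit max/min scanning loops with sorting the data once and returning last-minus-first of the sorted list.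
import Mathlib
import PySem

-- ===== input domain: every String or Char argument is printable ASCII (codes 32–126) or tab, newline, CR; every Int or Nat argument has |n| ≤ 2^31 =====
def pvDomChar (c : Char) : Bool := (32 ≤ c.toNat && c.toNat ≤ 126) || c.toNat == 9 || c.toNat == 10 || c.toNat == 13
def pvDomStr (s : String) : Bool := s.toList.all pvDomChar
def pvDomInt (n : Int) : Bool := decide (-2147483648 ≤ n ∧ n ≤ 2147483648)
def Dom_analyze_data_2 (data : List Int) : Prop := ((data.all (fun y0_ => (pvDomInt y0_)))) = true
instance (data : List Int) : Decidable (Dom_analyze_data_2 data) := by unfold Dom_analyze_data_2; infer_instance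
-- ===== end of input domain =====

-- B computes the range by sorting once and taking last-minus-first instead of A's two max/min scans.

-- ===== PORT A =====
-- A scans data twice: first loop for max_val, second loop for min_val; data[0] raises IndexError on empty input.
def analyze_data_2 (data : List Int) : Int :=
  match data with
  | [] => 0  -- unreachable under Pre_ (A raises IndexError on [])
  | h :: _ =>
    let max_val := data.foldl (fun m item => if item > m then item else m) h
    let min_val := data.foldl (fun m item => if item < m then item else m) h
    max_val - min_val

-- ===== PORT B =====
-- B sorts the data once; s[-1] and s[0] raise IndexError on empty input (the 'none' branch).
def analyze_data_2_alt (data : List Int) : Int :=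
  let s := PySem.List.sorted data (fun x => x) false
  match PySem.List.pyGet? s (-1), PySem.List.pyGet? s 0 with
  | some hi, some lo => hi - lo
  | _, _ => 0  -- unreachable under Pre_ (IndexError on [])

-- ===== PRECONDITION & SPEC =====
-- Both programs raise IndexError on the empty list.
def Pre_analyze_data_2 (data : List Int) : Prop := data ≠ []
instance (data : List Int) : Decidable (Pre_analyze_data_2 data) := by unfold Pre_analyze_data_2; infer_instance
def pvWitness_analyze_data_2 : List Int := [3, -1, 4]

def Spec_analyze_data_2 (data : List Int) (out : Int) : Prop := out = analyze_data_2_alt data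
instance (data : List Int) (out : Int) : Decidable (Spec_analyze_data_2 data out) := by unfold Spec_analyze_data_2; infer_instance

-- ===== CLAIM =====
def Claim_equal_analyze_data_2 : Prop := ∀ (data : List Int), Dom_analyze_data_2 data → Pre_analyze_data_2 data → Spec_analyze_data_2 data (analyze_data_2 data)

-- ===== LEMMAS AND PROOFS =====
-- A's max fold returns an element of a :: l that bounds a :: l from above.
theorem pv_fmax_spec (l : List Int) (a : Int) :
    (l.foldl (fun m item => if item > m then item else m) a ∈ a :: l)
    ∧ (∀ x ∈ a :: l, x ≤ l.foldl (fun m item => if item > m then item else m) a) := by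
  induction l generalizing a with
  | nil => simp
  | cons y ys ih =>
    simp only [List.foldl_cons]
    by_cases hya : y > a
    · simp only [if_pos hya]
      rcases ih y with ⟨hmem, hub⟩
      have hacc := hub _ (List.mem_cons_self ..)
      refine ⟨?_, ?_⟩
      · rw [List.mem_cons] at hmem
        rcases hmem with hm | hm
        · rw [hm]; simp
        · simp [hm]
      · intro x hx
        rw [List.mem_cons, List.mem_cons] at hx
        rcases hx with rfl | rfl | hxm
        · omega
        · omega
        · exact hub _ (List.mem_cons_of_mem _ hxm)
    · simp only [if_neg hya]
      rcases ih a with ⟨hmem, hub⟩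
      have hacc := hub _ (List.mem_cons_self ..)
      refine ⟨?_, ?_⟩
      · rw [List.mem_cons] at hmem
        rcases hmem with hm | hm
        · rw [hm]; simp
        · simp [hm]
      · intro x hx
        rw [List.mem_cons, List.mem_cons] at hx
        rcases hx with rfl | rfl | hxm
        · omega
        · omega
        · exact hub _ (List.mem_cons_of_mem _ hxm)

-- A's min fold returns an element of a :: l that bounds a :: l from below.
theorem pv_fmin_spec (l : List Int) (a : Int) :
    (l.foldl (fun m item => if item < m then item else m) a ∈ a :: l)
    ∧ (∀ x ∈ a :: l, l.foldl (fun m item => if item < m then item else m) a ≤ x) := by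
  induction l generalizing a with
  | nil => simp
  | cons y ys ih =>
    simp only [List.foldl_cons]
    by_cases hya : y < a
    · simp only [if_pos hya]
      rcases ih y with ⟨hmem, hlb⟩
      have hacc := hlb _ (List.mem_cons_self ..)
      refine ⟨?_, ?_⟩
      · rw [List.mem_cons] at hmem
        rcases hmem with hm | hm
        · rw [hm]; simp
        · simp [hm]
      · intro x hx
        rw [List.mem_cons, List.mem_cons] at hx
        rcases hx with rfl | rfl | hxm
        · omega
        · omega
        · exact hlb _ (List.mem_cons_of_mem _ hxm)
    · simp only [if_neg hya]
      rcases ih a with ⟨hmem, hlb⟩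
      have hacc := hlb _ (List.mem_cons_self ..)
      refine ⟨?_, ?_⟩
      · rw [List.mem_cons] at hmem
        rcases hmem with hm | hm
        · rw [hm]; simp
        · simp [hm]
      · intro x hx
        rw [List.mem_cons, List.mem_cons] at hx
        rcases hx with rfl | rfl | hxm
        · omega
        · omega
        · exact hlb _ (List.mem_cons_of_mem _ hxm)

-- The last element of the sorted list is an upper bound of data, the head a lower bound.
theorem pv_sorted_getLast_ub (data : List Int) (h : PySem.List.sorted data (fun x => x) false ≠ []) :
    ∀ x ∈ data, x ≤ (PySem.List.sorted data (fun x => x) false).getLast h := by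
  intro x hx
  set s := PySem.List.sorted data (fun x => x) false with hs
  have hmem : x ∈ s := (PySem.List.mem_sorted _ _ _ _).2 hx
  rcases List.getElem_of_mem hmem with ⟨p, hp, hxe⟩
  have hlast : s.getLast h = s[s.length - 1] := List.getLast_eq_getElem h
  have := PySem.List.sorted_id_getElem_mono (xs := data)
    (p := p) (q := s.length - 1) (by omega) (by rw [← hs]; omega)
  rw [hlast]
  simp only [← hs] at this
  omega

theorem pv_sorted_head_lb (data : List Int) (m : Int) (t : List Int)
    (h : PySem.List.sorted data (fun x => x) false = m :: t) :
    ∀ x ∈ data, m ≤ x :=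
  fun x hx => PySem.List.key_head_sorted_le data (fun x => x) h x hx

-- ===== VERDICT =====
theorem analyze_data_2_spec : Claim_equal_analyze_data_2 := by
  intro data _ hpre
  unfold Spec_analyze_data_2
  match data with
  | [] => exact absurd rfl hpre
  | h :: t =>
    have hsne : PySem.List.sorted (h :: t) (fun x => x) false ≠ [] := by
      rw [Ne, PySem.List.sorted_eq_nil_iff]; simp
    rcases List.exists_cons_of_ne_nil hsne with ⟨m, t', hcons⟩
    -- evaluate B
    have hB : analyze_data_2_alt (h :: t) = (m :: t').getLast (by simp) - m := by
      simp only [analyze_data_2_alt, hcons, PySem.List.pyGet?_neg_one, PySem.List.pyGet?_zero_cons,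
        List.getLast?_eq_some_getLast (l := m :: t') (by simp)]
    rw [hB]
    -- evaluate A
    unfold analyze_data_2
    simp only []
    rcases pv_fmax_spec (h :: t) h with ⟨hMmem, hMub⟩
    rcases pv_fmin_spec (h :: t) h with ⟨hNmem, hNlb⟩
    have hMmem' : (h :: t).foldl (fun m item => if item > m then item else m) h ∈ h :: t := by
      rw [List.mem_cons] at hMmem
      rcases hMmem with hx | hx
      · rw [hx]; exact List.mem_cons_self ..
      · exact hx
    have hNmem' : (h :: t).foldl (fun m item => if item < m then item else m) h ∈ h :: t := by
      rw [List.mem_cons] at hNmem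
      rcases hNmem with hx | hx
      · rw [hx]; exact List.mem_cons_self ..
      · exact hx
    have hlast_eq : (PySem.List.sorted (h :: t) (fun x => x) false).getLast hsne
        = (m :: t').getLast (by simp) := by
      congr 1
    have hlast_mem : (m :: t').getLast (by simp) ∈ h :: t := by
      rw [← hlast_eq]
      exact (PySem.List.mem_sorted _ _ _ _).1 (List.getLast_mem hsne)
    have hhead_mem : m ∈ h :: t := by
      have : m ∈ PySem.List.sorted (h :: t) (fun x => x) false := by
        rw [hcons]; exact List.mem_cons_self ..
      exact (PySem.List.mem_sorted _ _ _ _).1 this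
    have hub := pv_sorted_getLast_ub (h :: t) hsne
    have hlb := pv_sorted_head_lb (h :: t) m t' hcons
    have e1 : (h :: t).foldl (fun m item => if item > m then item else m) h
        = (m :: t').getLast (by simp) := by
      have h1 := hMub _ (List.mem_cons_of_mem _ hlast_mem)
      have h2 := hub _ hMmem'
      rw [hlast_eq] at h2
      omega
    have e2 : (h :: t).foldl (fun m item => if item < m then item else m) h = m := by
      have h1 := hNlb _ (List.mem_cons_of_mem _ hhead_mem)
      have h2 := hlb _ hNmem'
      omega
    rw [e1, e2]
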